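-- pv_equiv track=rewrite | github.com/PochecoPachico/Procon | AtCoder/ABC/116/c.py | solve
-- ===== SOURCE A (Python) =====
-- def solve(h):
--     if len(h) == 0:
--         return 0
--     if len(h) == 1:
--         return h[0]
--     if len(h) == 2:
--         return max(h)
--
--     mn = min(h)
--     x = -1
--     for i in range(len(h)):
--         if h[i] == mn:
--             x = i
--         h[i] -= mn
--     return mn + solve(h[:x]) + solve(h[x + 1:])
-- ===== SOURCE B (Python) =====
-- def solve(h):
--     # One pass: h[0] plus the sum of positive consecutive differences.
--     # (Return-value equivalence only: A mutates its argument in place, B does not.)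
--     if not h:
--         return 0
--     total = h[0]
--     for a, b in zip(h, h[1:]):
--         if b > a:
--             total += b - a
--     return total
-- ===== Notes on version B (the rewrite author's own statement) =====
-- stated objective: faster
-- what changed: Replaced the recursive divide-at-the-minimum scheme (min scan + subtract + two recursive calls per level) by a single left-to-right pass summing the positive consecutive differences on top of h[0].
import Mathlib
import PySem

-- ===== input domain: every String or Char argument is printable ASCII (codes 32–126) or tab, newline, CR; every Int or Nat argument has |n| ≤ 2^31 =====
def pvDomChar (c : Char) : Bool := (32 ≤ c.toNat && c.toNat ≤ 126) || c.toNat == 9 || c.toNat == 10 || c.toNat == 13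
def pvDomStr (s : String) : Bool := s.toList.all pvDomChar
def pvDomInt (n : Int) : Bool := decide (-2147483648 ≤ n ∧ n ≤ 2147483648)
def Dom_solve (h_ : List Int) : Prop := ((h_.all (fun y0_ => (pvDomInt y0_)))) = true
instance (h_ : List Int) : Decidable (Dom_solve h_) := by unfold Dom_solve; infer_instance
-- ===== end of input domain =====

-- B replaces A's O(n^2) divide-at-the-minimum recursion by one O(n) pass summing positive
-- consecutive differences (return-value equivalence only: A mutates its list argument in place).

-- ===== PORT A =====
-- A's recursion terminates because each recursive call gets a strictly shorter list (the min's
-- position is removed); we realise it with fuel = h.length, which is always sufficient.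
def solveF : Nat → List Int → Int
  | 0, _ => 0
  | fuel + 1, h_ =>
    if h_.length = 0 then 0
    else if h_.length = 1 then h_.headI
    else if h_.length = 2 then (PySem.List.max? h_ (fun y => y)).getD 0
    else
      let mn := (PySem.List.min? h_ (fun y => y)).getD 0
      -- the for-loop: x ends as the last index with h[i] = mn; every element gets mn subtracted
      let x := (List.range h_.length).foldl
        (fun x i => if h_.getD i 0 = mn then (i : Int) else x) (-1)
      let h2 := h_.map (fun v => v - mn)
      mn + solveF fuel (PySem.List.slice h2 none (some x))
         + solveF fuel (PySem.List.slice h2 (some (x + 1)) none)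

def solve (h_ : List Int) : Int := solveF h_.length h_

-- ===== PORT B =====
def solve_alt (h_ : List Int) : Int :=
  match h_ with
  | [] => 0
  | x :: rest =>
    (h_.zip rest).foldl (fun t p => if p.2 > p.1 then t + (p.2 - p.1) else t) x

-- ===== PRECONDITION & SPEC =====
def Spec_solve (h_ : List Int) (out : Int) : Prop := out = solve_alt h_
instance (h_ : List Int) (out : Int) : Decidable (Spec_solve h_ out) := by unfold Spec_solve; infer_instance

-- ===== CLAIM (what is proved, stated in full; the proofs are below) =====
def Claim_equal_solve : Prop := ∀ (h_ : List Int), Dom_solve h_ → Spec_solve h_ (solve h_)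

-- ===== LEMMAS AND PROOFS =====

-- sum of positive consecutive differences along prev :: rest
def pds : Int → List Int → Int
  | _, [] => 0
  | p, y :: ys => (if y > p then y - p else 0) + pds y ys

theorem foldl_pds (t : List Int) (p acc : Int) :
    (((p :: t).zip t).foldl (fun t q => if q.2 > q.1 then t + (q.2 - q.1) else t) acc)
      = acc + pds p t := by
  induction t generalizing p acc with
  | nil => simp [pds]
  | cons y ys ih =>
    simp only [List.zip_cons_cons, List.foldl_cons, pds, ih]
    split_ifs <;> ring

theorem solve_alt_cons (a : Int) (t : List Int) : solve_alt (a :: t) = a + pds a t := by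
  simp [solve_alt, foldl_pds]

theorem pds_shift (c p : Int) (t : List Int) :
    pds (p + c) (t.map (fun v => v + c)) = pds p t := by
  induction t generalizing p with
  | nil => simp [pds]
  | cons y ys ih =>
    simp only [List.map_cons, pds, ih]
    split_ifs with h1 h2 h2 <;> omega

theorem solve_alt_shift (c : Int) (h_ : List Int) (hne : h_ ≠ []) :
    solve_alt (h_.map (fun v => v + c)) = solve_alt h_ + c := by
  cases h_ with
  | nil => exact absurd rfl hne
  | cons a t => simp only [List.map_cons, solve_alt_cons, pds_shift]; ring

theorem pds_zero_nonneg (r : List Int) (hr : ∀ y ∈ r, 0 ≤ y) :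
    pds 0 r = solve_alt r := by
  cases r with
  | nil => simp [pds, solve_alt]
  | cons y ys =>
    have : 0 ≤ y := hr y (by simp)
    simp only [pds, solve_alt_cons]
    split_ifs with h <;> omega

theorem pds_split (l : List Int) (p : Int) (r : List Int) (hp : 0 ≤ p)
    (hl : ∀ y ∈ l, 0 ≤ y) (hr : ∀ y ∈ r, 0 ≤ y) :
    pds p (l ++ 0 :: r) = pds p l + solve_alt r := by
  induction l generalizing p with
  | nil =>
    simp only [List.nil_append, pds, pds_zero_nonneg r hr]
    split_ifs with h <;> omega
  | cons a l' ih =>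
    have ha : 0 ≤ a := hl a (by simp)
    simp only [List.cons_append, pds,
      ih a ha (fun y hy => hl y (by simp [hy]))]
    ring

theorem solve_alt_split (u v : List Int) (hu : ∀ y ∈ u, 0 ≤ y) (hv : ∀ y ∈ v, 0 ≤ y) :
    solve_alt (u ++ 0 :: v) = solve_alt u + solve_alt v := by
  cases u with
  | nil =>
    rw [List.nil_append, solve_alt_cons, pds_zero_nonneg v hv]
    simp [solve_alt]
  | cons a u' =>
    have ha : 0 ≤ a := hu a (by simp)
    simp only [List.cons_append, solve_alt_cons,
      pds_split u' a v ha (fun y hy => hu y (by simp [hy])) hv]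
    ring

-- the index-search loop: if some index satisfies the condition, the fold's result is a
-- nonnegative in-range index satisfying it
theorem lastIdx_found (cond : Nat → Prop) [DecidablePred cond] (n : Nat)
    (hex : ∃ i, i < n ∧ cond i) :
    0 ≤ ((List.range n).foldl (fun x i => if cond i then (i : Int) else x) (-1)) ∧
    ((List.range n).foldl (fun x i => if cond i then (i : Int) else x) (-1)).toNat < n ∧
    cond ((List.range n).foldl (fun x i => if cond i then (i : Int) else x) (-1)).toNat := by
  induction n with
  | zero => obtain ⟨i, hi, _⟩ := hex; omega
  | succ m ih =>
    rw [List.range_succ, List.foldl_append, List.foldl_cons, List.foldl_nil]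
    by_cases hc : cond m
    · rw [if_pos hc]
      exact ⟨Int.natCast_nonneg m, by simp, by simpa using hc⟩
    · rw [if_neg hc]
      obtain ⟨i, hi, hci⟩ := hex
      have him : i < m := by
        rcases Nat.lt_succ_iff_lt_or_eq.mp hi with h | h
        · exact h
        · exact absurd (h ▸ hci) hc
      have := ih ⟨i, him, hci⟩
      exact ⟨this.1, by omega, this.2.2⟩

theorem solveF_eq (fuel : Nat) : ∀ h_ : List Int, h_.length ≤ fuel →
    solveF fuel h_ = solve_alt h_ := by
  induction fuel with
  | zero =>
    intro h_ hlen
    have : h_ = [] := List.eq_nil_of_length_eq_zero (by omega)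
    simp [this, solveF, solve_alt]
  | succ f ih =>
    intro h_ hlen
    match h_ with
    | [] => simp [solveF, solve_alt]
    | [a] => simp [solveF, solve_alt]
    | [a, b] =>
      simp only [solveF, solve_alt_cons, pds]
      simp [PySem.List.max?_id_cons]
      split_ifs with h <;> omega
    | a :: b :: c :: t =>
      set h0 : List Int := a :: b :: c :: t with hh0
      have hne : h0 ≠ [] := by simp [hh0]
      have hlen3 : 3 ≤ h0.length := by simp [hh0]
      -- min facts
      obtain ⟨mn, hmn⟩ : ∃ m, PySem.List.min? h0 (fun y => y) = some m := by
        cases hmin : PySem.List.min? h0 (fun y => y) with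
        | none => exact absurd ((PySem.List.min?_eq_none_iff h0 (fun y => y)).mp hmin) hne
        | some m => exact ⟨m, rfl⟩
      have hmem : mn ∈ h0 := PySem.List.min?_mem hmn
      have hmin : ∀ y ∈ h0, mn ≤ y := fun y hy => PySem.List.min?_isMin hmn y hy
      -- the loop finds a valid index
      obtain ⟨j, hj, hgj⟩ := List.mem_iff_getElem.mp hmem
      have hfound := lastIdx_found (fun i => h0.getD i 0 = mn) h0.length
        ⟨j, hj, by simp [List.getD_eq_getElem?_getD, List.getElem?_eq_getElem hj, hgj]⟩
      set xr : Int := (List.range h0.length).foldl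
        (fun x i => if h0.getD i 0 = mn then (i : Int) else x) (-1) with hxr
      obtain ⟨hx0, hxlt, hxc⟩ := hfound
      set x : Nat := xr.toNat with hx
      have hxr_cast : xr = (x : Int) := by omega
      set h2 : List Int := h0.map (fun v => v - mn) with hh2
      have hlen2 : h2.length = h0.length := by simp [hh2]
      -- h2 decomposes around a 0 at position x
      have hx2 : h2[x]'(by omega) = 0 := by
        simp only [hh2, List.getElem_map]
        have : h0[x]'hxlt = mn := by
          have := hxc
          simpa [List.getD_eq_getElem?_getD, List.getElem?_eq_getElem hxlt] using this
        omega
      have hdecomp : h2 = h2.take x ++ 0 :: h2.drop (x + 1) := by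
        conv_lhs => rw [← List.take_append_drop x h2]
        congr 1
        rw [List.drop_eq_getElem_cons (by omega), hx2]
      have hnonneg : ∀ y ∈ h2, 0 ≤ y := by
        intro y hy
        simp only [hh2, List.mem_map] at hy
        obtain ⟨v, hv, rfl⟩ := hy
        have := hmin v hv
        omega
      -- unfold one step of A
      have hstep : solveF (f + 1) h0 =
          mn + solveF f (h2.take x) + solveF f (h2.drop (x + 1)) := by
        rw [solveF]
        have h1 : ¬ h0.length = 0 := by omega
        have h2' : ¬ h0.length = 1 := by omega
        have h3 : ¬ h0.length = 2 := by omega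
        simp only [h1, h2', h3, if_false, hmn, Option.getD_some, ← hxr, hxr_cast]
        rw [show ((x : Int) + 1) = ((x + 1 : Nat) : Int) by push_cast; ring]
        rw [PySem.List.slice_to_natCast, PySem.List.slice_from_natCast]
      -- recursive calls
      have hlt : x < h0.length := hxlt
      have hta : (h2.take x).length ≤ f := by
        simp only [List.length_take, hlen2]; omega
      have hda : (h2.drop (x + 1)).length ≤ f := by
        simp only [List.length_drop, hlen2]; omega
      rw [hstep, ih _ hta, ih _ hda]
      have hA : solve_alt h2 = solve_alt (h2.take x) + solve_alt (h2.drop (x + 1)) := by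
        conv_lhs => rw [hdecomp]
        exact solve_alt_split (h2.take x) (h2.drop (x + 1))
          (fun y hy => hnonneg y (List.mem_of_mem_take hy))
          (fun y hy => hnonneg y (List.mem_of_mem_drop hy))
      have hB : solve_alt h2 = solve_alt h0 + (-mn) := by
        have hmap : h2 = h0.map (fun v => v + (-mn)) := by
          simp [hh2, sub_eq_add_neg]
        rw [hmap]
        exact solve_alt_shift (-mn) h0 hne
      omega

-- ===== VERDICT (by name: the statement is the Claim_ definition above) =====
theorem solve_spec : Claim_equal_solve := by
  intro h_ _
  unfold Spec_solve solve
  exact solveF_eq h_.length h_ le_rfl
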